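-- pv_equiv track=rewrite | github.com/kimjune01/june.kim | worklog/h27_counterexample.py | exhaustive_any_2n3
-- ===== SOURCE A (Python) =====
-- from itertools import combinations
--
-- def temporal_reachability(n, ts, edge_set):
--     edges = [(e, ts[e]) for e in edge_set]
--     edges.sort(key=lambda x: x[1])
--     pairs = set()
--     for src in range(n):
--         earliest = {src: 0}
--         changed = True
--         while changed:
--             changed = False
--             for e, t in edges:
--                 u, v = tuple(e)
--                 if u in earliest and t > earliest[u]:
--                     if v not in earliest or t < earliest[v]:
--                         earliest[v] = t
--                         changed = True
--                 if v in earliest and t > earliest[v]: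
--                     if u not in earliest or t < earliest[u]:
--                         earliest[u] = t
--                         changed = True
--         for v in earliest:
--             if v != src:
--                 pairs.add((src, v))
--     return pairs
--
-- def exhaustive_any_2n3(n, ts):
--     """Try ALL subsets of size 2n-3 to find a valid spanner."""
--     full_reach = temporal_reachability(n, ts, set(ts.keys()))
--     all_edges = list(ts.keys())
--     target_size = 2 * n - 3
--
--     count = 0
--     for edge_set in combinations(all_edges, target_size):
--         count += 1
--         reach = temporal_reachability(n, ts, set(edge_set))
--         if reach == full_reach:
--             return set(edge_set), True, count
--         if count > 500000:
--             return None, False, count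
--
--     return None, False, count
-- ===== SOURCE B (Python) =====
-- from itertools import combinations
--
-- def _reach_single_pass(n, ts, edge_set):
--     # One forward pass over the time-sorted edges per source (no fixed-point loop):
--     # times strictly increase along a temporal path, so sorted order relaxes
--     # every usable edge exactly when its endpoints can already be reached.
--     edges = sorted(((e, ts[e]) for e in edge_set), key=lambda x: x[1])
--     pairs = set()
--     for src in range(n):
--         earliest = {src: 0}
--         for (u, v), t in edges:
--             if u in earliest and t > earliest[u] and (v not in earliest or t < earliest[v]):
--                 earliest[v] = t
--             if v in earliest and t > earliest[v] and (u not in earliest or t < earliest[u]):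
--                 earliest[u] = t
--         for v in earliest:
--             if v != src:
--                 pairs.add((src, v))
--     return pairs
--
-- def exhaustive_any_2n3(n, ts):
--     """Try ALL subsets of size 2n-3 to find a valid spanner."""
--     full_reach = _reach_single_pass(n, ts, set(ts.keys()))
--     all_edges = list(ts.keys())
--     target_size = 2 * n - 3
--
--     count = 0
--     for edge_set in combinations(all_edges, target_size):
--         count += 1
--         reach = _reach_single_pass(n, ts, set(edge_set))
--         if reach == full_reach:
--             return set(edge_set), True, count
--         if count > 500000:
--             return None, False, count
--
--     return None, False, count
-- ===== Notes on version B (the rewrite author's own statement) =====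
-- stated objective: alternative
-- what changed: temporal_reachability's fixed-point while-loop (repeated full scans of the edge list until no change) is replaced by a single forward pass over the time-sorted edges per source, relaxing each edge once in both directions; the outer combinations search is unchanged.
import Mathlib
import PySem

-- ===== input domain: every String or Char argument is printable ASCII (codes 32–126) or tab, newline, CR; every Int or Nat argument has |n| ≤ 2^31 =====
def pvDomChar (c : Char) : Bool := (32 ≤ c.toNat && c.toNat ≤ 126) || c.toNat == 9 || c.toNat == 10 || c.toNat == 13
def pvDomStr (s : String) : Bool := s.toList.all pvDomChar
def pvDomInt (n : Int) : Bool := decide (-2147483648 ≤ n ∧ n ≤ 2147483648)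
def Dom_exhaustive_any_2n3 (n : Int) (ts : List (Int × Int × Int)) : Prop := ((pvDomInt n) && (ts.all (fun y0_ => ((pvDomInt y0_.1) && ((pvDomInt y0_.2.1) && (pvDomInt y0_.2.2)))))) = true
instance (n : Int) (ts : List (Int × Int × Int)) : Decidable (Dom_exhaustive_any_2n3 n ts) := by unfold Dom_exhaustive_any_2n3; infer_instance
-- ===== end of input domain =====

-- B replaces A's fixed-point while-loop over the edge scan by a single pass over the
-- time-sorted edges per source (same combinations search otherwise); equal return values.


-- ===== SHARED INPUT/LIBRARY HELPERS (used by both ports) =====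

-- the dict[tuple[int,int],int] argument, rebuilt as a Python dict (key (u,v), later value wins)
def pvDictOf (ts : List (Int × Int × Int)) : PySem.Dict (Int × Int) Int :=
  ts.foldl (fun d e => d.insert (e.1, e.2.1) e.2.2) PySem.Dict.empty

-- itertools.combinations(xs, r), tuples in the library's lexicographic index order
def pvCombos {α : Type} : List α → Nat → List (List α)
  | _, 0 => [[]]
  | [], _ + 1 => []
  | x :: xs, r + 1 => (pvCombos xs r).map (fun c => x :: c) ++ pvCombos xs (r + 1)

-- ===== PORT A =====

-- one direction 'if a in earliest and t > earliest[a]: if b not in earliest or t < earliest[b]: …'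
def pvRelax1 (st : PySem.Dict Int Int × Bool) (a b t : Int) : PySem.Dict Int Int × Bool :=
  match st.1.get? a with
  | some ea =>
    if ea < t then
      match st.1.get? b with
      | none => (st.1.insert b t, true)
      | some eb => if t < eb then (st.1.insert b t, true) else st
    else st
  | none => st

-- the body of A's 'for e, t in edges' loop (both directions, second sees the first's update)
def pvRelaxA (st : PySem.Dict Int Int × Bool) (et : (Int × Int) × Int) : PySem.Dict Int Int × Bool :=
  pvRelax1 (pvRelax1 st et.1.1 et.1.2 et.2) et.1.2 et.1.1 et.2

-- termination measure for A's 'while changed' loop (cited by pvLoopA's decreasing_by)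
def pvPsi (T : List Int) : Option Int → Nat
  | none => T.length + 1
  | some x => (T.filter (fun t => decide (t < x))).length

def pvMu (E T : List Int) (d : PySem.Dict Int Int) : Nat :=
  (E.map (fun k => pvPsi T (d.get? k))).sum

theorem pv_filt_lt (T : List Int) (t x : Int) (ht : t ∈ T) (hx : t < x) :
    (T.filter (fun y => decide (y < t))).length < (T.filter (fun y => decide (y < x))).length := by
  induction T with
  | nil => cases ht
  | cons a T ih =>
    rcases List.mem_cons.mp ht with rfl | ha
    · have h1 : (T.filter (fun y => decide (y < t))).length ≤ (T.filter (fun y => decide (y < x))).length := by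
        apply List.Sublist.length_le
        apply List.monotone_filter_right
        intro a ha
        simp at ha ⊢
        omega
      simp only [List.filter_cons]
      simp [hx]
      omega
    · have := ih ha
      by_cases h2 : a < t
      · simp only [List.filter_cons]
        simp [h2, h2.trans hx]
        omega
      · by_cases h3 : a < x <;> simp only [List.filter_cons] <;> simp [h2, h3] <;> omega

theorem pvPsi_insert_lt (T : List Int) (t : Int) (ht : t ∈ T) (o : Option Int)
    (h : ∀ x, o = some x → t < x) : pvPsi T (some t) < pvPsi T o := by
  cases o with
  | none =>
    simp only [pvPsi]
    exact Nat.lt_succ_of_le (List.length_filter_le _ _)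
  | some x => exact pv_filt_lt T t x ht (h x rfl)

theorem pvPsi_insert_le (T : List Int) (d : PySem.Dict Int Int) (k t : Int) (ht : t ∈ T)
    (h : ∀ x, d.get? k = some x → t < x) (e : Int) :
    pvPsi T ((d.insert k t).get? e) ≤ pvPsi T (d.get? e) := by
  by_cases he : e = k
  · subst he
    rw [PySem.Dict.get?_insert_self]
    exact le_of_lt (pvPsi_insert_lt T t ht _ h)
  · rw [PySem.Dict.get?_insert_of_ne _ _ he]

theorem pvMu_insert_lt (E T : List Int) (d : PySem.Dict Int Int) (k t : Int)
    (hk : k ∈ E) (ht : t ∈ T) (h : ∀ x, d.get? k = some x → t < x) :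
    pvMu E T (d.insert k t) < pvMu E T d := by
  unfold pvMu
  induction E with
  | nil => cases hk
  | cons a E ih =>
    simp only [List.map_cons, List.sum_cons]
    rcases List.mem_cons.mp hk with rfl | ha
    · have h1 : pvPsi T ((d.insert k t).get? k) < pvPsi T (d.get? k) := by
        rw [PySem.Dict.get?_insert_self]
        exact pvPsi_insert_lt T t ht _ h
      have h2 : ((E.map (fun k' => pvPsi T ((d.insert k t).get? k'))).sum) ≤ ((E.map (fun k' => pvPsi T (d.get? k'))).sum) :=
        List.sum_le_sum (fun i _ => pvPsi_insert_le T d k t ht h i)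
      omega
    · have h1 : pvPsi T ((d.insert k t).get? a) ≤ pvPsi T (d.get? a) := pvPsi_insert_le T d k t ht h a
      have h2 := ih ha
      omega

theorem pvRelax1_mu (E T : List Int) (st : PySem.Dict Int Int × Bool) (a b t : Int)
    (hb : b ∈ E) (ht : t ∈ T) :
    pvRelax1 st a b t = st ∨ ((pvRelax1 st a b t).2 = true ∧ pvMu E T (pvRelax1 st a b t).1 < pvMu E T st.1) := by
  unfold pvRelax1
  cases hga : st.1.get? a with
  | none => left; rfl
  | some ea =>
    by_cases hlt : ea < t
    · simp only [hlt, if_true]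
      cases hgb : st.1.get? b with
      | none =>
        right
        exact ⟨by simp, pvMu_insert_lt E T st.1 b t hb ht (fun x hx => by simp [hgb] at hx)⟩
      | some eb =>
        by_cases hteb : t < eb
        · simp only [hteb, if_true]
          right
          exact ⟨by simp, pvMu_insert_lt E T st.1 b t hb ht (fun x hx => by rw [hgb] at hx; cases hx; exact hteb)⟩
        · simp [hteb]
    · simp [hlt]

theorem pvRelaxA_mu (E T : List Int) (st : PySem.Dict Int Int × Bool) (e : (Int × Int) × Int)
    (hu : e.1.1 ∈ E) (hv : e.1.2 ∈ E) (ht : e.2 ∈ T) :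
    pvRelaxA st e = st ∨ ((pvRelaxA st e).2 = true ∧ pvMu E T (pvRelaxA st e).1 < pvMu E T st.1) := by
  unfold pvRelaxA
  rcases pvRelax1_mu E T st e.1.1 e.1.2 e.2 hv ht with h1 | ⟨h1c, h1m⟩
  · rw [h1]
    exact pvRelax1_mu E T st e.1.2 e.1.1 e.2 hu ht
  · rcases pvRelax1_mu E T (pvRelax1 st e.1.1 e.1.2 e.2) e.1.2 e.1.1 e.2 hu ht with h2 | ⟨h2c, h2m⟩
    · rw [h2]; right; exact ⟨h1c, h1m⟩
    · right; exact ⟨h2c, lt_trans h2m h1m⟩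

theorem pvPass_mono (E T : List Int) (l : List ((Int × Int) × Int))
    (hl : ∀ e ∈ l, e.1.1 ∈ E ∧ e.1.2 ∈ E ∧ e.2 ∈ T) (st : PySem.Dict Int Int × Bool) :
    pvMu E T (l.foldl pvRelaxA st).1 ≤ pvMu E T st.1 ∧ (st.2 = true → (l.foldl pvRelaxA st).2 = true) := by
  induction l generalizing st with
  | nil => exact ⟨le_refl _, fun h => h⟩
  | cons e l ih =>
    have he := hl e (List.mem_cons_self)
    have hl' : ∀ e ∈ l, e.1.1 ∈ E ∧ e.1.2 ∈ E ∧ e.2 ∈ T := fun x hx => hl x (List.mem_cons_of_mem _ hx)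
    simp only [List.foldl_cons]
    rcases pvRelaxA_mu E T st e he.1 he.2.1 he.2.2 with h | ⟨hc, hm⟩
    · rw [h]; exact ih hl' st
    · have := ih hl' (pvRelaxA st e)
      exact ⟨le_trans this.1 (le_of_lt hm), fun _ => this.2 hc⟩

theorem pvPass_mu (E T : List Int) (l : List ((Int × Int) × Int))
    (hl : ∀ e ∈ l, e.1.1 ∈ E ∧ e.1.2 ∈ E ∧ e.2 ∈ T) (st : PySem.Dict Int Int × Bool) :
    l.foldl pvRelaxA st = st ∨ ((l.foldl pvRelaxA st).2 = true ∧ pvMu E T (l.foldl pvRelaxA st).1 < pvMu E T st.1) := by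
  induction l generalizing st with
  | nil => left; rfl
  | cons e l ih =>
    have he := hl e (List.mem_cons_self)
    have hl' : ∀ e ∈ l, e.1.1 ∈ E ∧ e.1.2 ∈ E ∧ e.2 ∈ T := fun x hx => hl x (List.mem_cons_of_mem _ hx)
    simp only [List.foldl_cons]
    rcases pvRelaxA_mu E T st e he.1 he.2.1 he.2.2 with h | ⟨hc, hm⟩
    · rw [h]; exact ih hl' st
    · right
      have hmono := pvPass_mono E T l hl' (pvRelaxA st e)
      exact ⟨hmono.2 hc, lt_of_le_of_lt hmono.1 hm⟩

-- one full 'for e, t in edges' pass, with the changed flag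
def pvPassAll (edges : List ((Int × Int) × Int)) (d : PySem.Dict Int Int) :
    PySem.Dict Int Int × Bool :=
  edges.foldl pvRelaxA (d, false)

-- A's 'while changed' loop: run full passes over edges until no change
def pvLoopA (edges : List ((Int × Int) × Int)) (d : PySem.Dict Int Int) : PySem.Dict Int Int :=
  if h : (pvPassAll edges d).2 = true then pvLoopA edges (pvPassAll edges d).1
  else (pvPassAll edges d).1
termination_by pvMu (edges.flatMap (fun e => [e.1.1, e.1.2])) (edges.map (fun e => e.2)) d
decreasing_by
  unfold pvPassAll at h ⊢
  rcases pvPass_mu (edges.flatMap (fun e => [e.1.1, e.1.2])) (edges.map (fun e => e.2)) edges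
      (fun e he => ⟨List.mem_flatMap.mpr ⟨e, he, by simp⟩, List.mem_flatMap.mpr ⟨e, he, by simp⟩,
        List.mem_map.mpr ⟨e, he, rfl⟩⟩) (d, false) with hfix | ⟨_, hlt⟩
  · rw [hfix] at h
    simp at h
  · exact hlt

-- A's temporal_reachability
def pvTrA (n : Int) (d : PySem.Dict (Int × Int) Int) (edge_set : PySem.Set (Int × Int)) :
    PySem.Set (Int × Int) :=
  let edges0 := edge_set.map (fun e => (e, d.getD e 0))   -- ts[e]; e is always a key of ts here
  let edges := PySem.List.sorted edges0 (fun x => x.2) false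
  (PySem.List.pyRange 0 n 1).foldl (fun pairs src =>
    let earliest := pvLoopA edges (PySem.Dict.ofList [(src, 0)])
    earliest.keys.foldl (fun pairs v => if v ≠ src then PySem.Set.add pairs (src, v) else pairs) pairs)
    PySem.Set.empty

-- A's search loop over combinations, with the running count and the 500000 cutoff
def pvSearchA (n : Int) (d : PySem.Dict (Int × Int) Int) (full : PySem.Set (Int × Int))
    (combos : List (List (Int × Int))) (count : Int) : (Option (List (Int × Int))) × Bool × Int :=
  match combos with
  | [] => (none, false, count)
  | es :: rest =>
    let c := count + 1
    let reach := pvTrA n d (PySem.Set.ofList es)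
    if PySem.Set.equal reach full then (some (PySem.Set.ofList es), true, c)
    else if c > 500000 then (none, false, c)
    else pvSearchA n d full rest c

def exhaustive_any_2n3 (n : Int) (ts : List (Int × Int × Int)) :
    (Option (List (Int × Int))) × Bool × Int :=
  let d := pvDictOf ts
  let full_reach := pvTrA n d (PySem.Set.ofList d.keys)
  let all_edges := d.keys
  let target_size := 2 * n - 3
  pvSearchA n d full_reach (pvCombos all_edges target_size.toNat) 0

-- ===== PORT B =====

-- one combined-condition relaxation of Source B's single pass
def pvRelaxB1 (d : PySem.Dict Int Int) (a b t : Int) : PySem.Dict Int Int :=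
  if (Option.any (fun ea => decide (ea < t)) (d.get? a))
      && (Option.all (fun eb => decide (t < eb)) (d.get? b)) then d.insert b t else d

-- the body of Source B's 'for (u, v), t in edges' loop
def pvStepB (d : PySem.Dict Int Int) (et : (Int × Int) × Int) : PySem.Dict Int Int :=
  pvRelaxB1 (pvRelaxB1 d et.1.1 et.1.2 et.2) et.1.2 et.1.1 et.2

-- Source B's _reach_single_pass
def pvTrB (n : Int) (d : PySem.Dict (Int × Int) Int) (edge_set : PySem.Set (Int × Int)) :
    PySem.Set (Int × Int) :=
  let edges0 := edge_set.map (fun e => (e, d.getD e 0))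
  let edges := PySem.List.sorted edges0 (fun x => x.2) false
  (PySem.List.pyRange 0 n 1).foldl (fun pairs src =>
    let earliest := edges.foldl pvStepB (PySem.Dict.ofList [(src, 0)])
    earliest.keys.foldl (fun pairs v => if v ≠ src then PySem.Set.add pairs (src, v) else pairs) pairs)
    PySem.Set.empty

def pvSearchB (n : Int) (d : PySem.Dict (Int × Int) Int) (full : PySem.Set (Int × Int))
    (combos : List (List (Int × Int))) (count : Int) : (Option (List (Int × Int))) × Bool × Int :=
  match combos with
  | [] => (none, false, count)
  | es :: rest =>
    let c := count + 1
    let reach := pvTrB n d (PySem.Set.ofList es)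
    if PySem.Set.equal reach full then (some (PySem.Set.ofList es), true, c)
    else if c > 500000 then (none, false, c)
    else pvSearchB n d full rest c

def exhaustive_any_2n3_alt (n : Int) (ts : List (Int × Int × Int)) :
    (Option (List (Int × Int))) × Bool × Int :=
  let d := pvDictOf ts
  let full_reach := pvTrB n d (PySem.Set.ofList d.keys)
  let all_edges := d.keys
  let target_size := 2 * n - 3
  pvSearchB n d full_reach (pvCombos all_edges target_size.toNat) 0

-- ===== PRECONDITION & SPEC =====

-- Python raises ValueError (combinations with negative r) when 2*n-3 < 0, i.e. n ≤ 1;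
-- those inputs are excluded. On every other input A returns normally.
def Pre_exhaustive_any_2n3 (n : Int) (ts : List (Int × Int × Int)) : Prop := 0 ≤ 2 * n - 3
instance (n : Int) (ts : List (Int × Int × Int)) : Decidable (Pre_exhaustive_any_2n3 n ts) := by
  unfold Pre_exhaustive_any_2n3; infer_instance

def pvWitness_exhaustive_any_2n3 : Int × (List (Int × Int × Int)) := (2, [(0, 1, 3)])

def Spec_exhaustive_any_2n3 (n : Int) (ts : List (Int × Int × Int))
    (out : (Option (List (Int × Int))) × Bool × Int) : Prop := out = exhaustive_any_2n3_alt n ts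
instance (n : Int) (ts : List (Int × Int × Int)) (out : (Option (List (Int × Int))) × Bool × Int) :
    Decidable (Spec_exhaustive_any_2n3 n ts out) := by unfold Spec_exhaustive_any_2n3; infer_instance

-- ===== CLAIM (what is proved, stated in full; the proofs are below) =====
def Claim_equal_exhaustive_any_2n3 : Prop := ∀ (n : Int) (ts : List (Int × Int × Int)), Dom_exhaustive_any_2n3 n ts → Pre_exhaustive_any_2n3 n ts → Spec_exhaustive_any_2n3 n ts (exhaustive_any_2n3 n ts)

-- ===== LEMMAS AND PROOFS =====

-- membership in a dict's keys is definedness of get?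
theorem pv_mem_keys_iff {κ ν : Type} [BEq κ] [LawfulBEq κ] (d : PySem.Dict κ ν) (k : κ) :
    (d.get? k).isSome ↔ k ∈ d.keys := by
  rw [← Option.ne_none_iff_isSome]
  simp [PySem.Dict.get?, PySem.Dict.keys, List.find?_eq_none]

-- B's step is the dict component of A's step
theorem pvRelax1_fst (st : PySem.Dict Int Int × Bool) (a b t : Int) :
    (pvRelax1 st a b t).1 = pvRelaxB1 st.1 a b t := by
  unfold pvRelax1 pvRelaxB1
  cases hga : st.1.get? a with
  | none => simp
  | some ea =>
    by_cases hlt : ea < t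
    · cases hgb : st.1.get? b with
      | none => simp [hga, hgb, hlt]
      | some eb => by_cases hteb : t < eb <;> simp [hgb, hlt, hteb]
    · simp [hga, hlt]

theorem pvRelaxA_fst (st : PySem.Dict Int Int × Bool) (e : (Int × Int) × Int) :
    (pvRelaxA st e).1 = pvStepB st.1 e := by
  unfold pvRelaxA pvStepB
  rw [pvRelax1_fst, pvRelax1_fst]

theorem pvPass_fst (l : List ((Int × Int) × Int)) (st : PySem.Dict Int Int × Bool) :
    (l.foldl pvRelaxA st).1 = l.foldl pvStepB st.1 := by
  induction l generalizing st with
  | nil => rfl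
  | cons e l ih => simp only [List.foldl_cons]; rw [ih, pvRelaxA_fst]

-- entries only improve (get stronger) under relaxation
theorem pvRelaxB1_mono (d : PySem.Dict Int Int) (a b t : Int) (w : Int) (x : Int)
    (h : d.get? w = some x) : ∃ y ≤ x, (pvRelaxB1 d a b t).get? w = some y := by
  unfold pvRelaxB1
  split
  · next hcond =>
    by_cases hw : w = b
    · subst hw
      rw [PySem.Dict.get?_insert_self]
      refine ⟨t, ?_, rfl⟩
      have := (Bool.and_eq_true _ _).mp hcond |>.2
      rw [h] at this
      simp at this
      omega
    · rw [PySem.Dict.get?_insert_of_ne _ _ hw]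
      exact ⟨x, le_refl _, h⟩
  · exact ⟨x, le_refl _, h⟩

theorem pvStepB_mono (d : PySem.Dict Int Int) (e : (Int × Int) × Int) (w x : Int)
    (h : d.get? w = some x) : ∃ y ≤ x, (pvStepB d e).get? w = some y := by
  obtain ⟨y, hy, hg⟩ := pvRelaxB1_mono d e.1.1 e.1.2 e.2 w x h
  obtain ⟨z, hz, hg2⟩ := pvRelaxB1_mono _ e.1.2 e.1.1 e.2 w y hg
  exact ⟨z, le_trans hz hy, hg2⟩

theorem pvPassB_mono (l : List ((Int × Int) × Int)) (d : PySem.Dict Int Int) (w x : Int)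
    (h : d.get? w = some x) : ∃ y ≤ x, (l.foldl pvStepB d).get? w = some y := by
  induction l generalizing d x with
  | nil => exact ⟨x, le_refl _, h⟩
  | cons e l ih =>
    obtain ⟨y, hy, hg⟩ := pvStepB_mono d e w x h
    obtain ⟨z, hz, hg2⟩ := ih _ _ hg
    exact ⟨z, le_trans hz hy, hg2⟩

-- temporal reachability: v reachable at time t from src via edges with strictly increasing times
inductive pvR (E : List ((Int × Int) × Int)) (src : Int) : Int → Int → Prop
  | base : pvR E src src 0
  | fwd {u v t t'} : pvR E src u t' → ((u, v), t) ∈ E → t' < t → pvR E src v t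
  | bwd {u v t t'} : pvR E src v t' → ((u, v), t) ∈ E → t' < t → pvR E src u t

-- soundness: every dict entry produced is a reachability fact
theorem pvRelaxB1_sound (E : List ((Int × Int) × Int)) (src : Int) (d : PySem.Dict Int Int)
    (a b t : Int) (hedge : ∃ p q, ((p, q), t) ∈ E ∧ ((a, b) = (p, q) ∨ (a, b) = (q, p)))
    (hd : ∀ w x, d.get? w = some x → pvR E src w x) :
    ∀ w x, (pvRelaxB1 d a b t).get? w = some x → pvR E src w x := by
  intro w x hw
  unfold pvRelaxB1 at hw
  split at hw
  · next hcond =>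
    rcases (Bool.and_eq_true _ _).mp hcond with ⟨h1, _⟩
    by_cases hwb : w = b
    · subst hwb
      rw [PySem.Dict.get?_insert_self] at hw
      cases hw
      cases hga : d.get? a with
      | none => rw [hga] at h1; simp at h1
      | some ea =>
        rw [hga] at h1
        simp at h1
        have hra := hd a ea hga
        obtain ⟨p, q, hmem, hpq | hpq⟩ := hedge
        · cases hpq; exact pvR.fwd hra hmem h1
        · cases hpq; exact pvR.bwd hra hmem h1
    · rw [PySem.Dict.get?_insert_of_ne _ _ hwb] at hw
      exact hd w x hw
  · exact hd w x hw

theorem pvStepB_sound (E : List ((Int × Int) × Int)) (src : Int) (d : PySem.Dict Int Int)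
    (e : (Int × Int) × Int) (he : e ∈ E)
    (hd : ∀ w x, d.get? w = some x → pvR E src w x) :
    ∀ w x, (pvStepB d e).get? w = some x → pvR E src w x := by
  unfold pvStepB
  apply pvRelaxB1_sound E src _ _ _ _ ⟨e.1.1, e.1.2, by simpa using he, Or.inr rfl⟩
  apply pvRelaxB1_sound E src _ _ _ _ ⟨e.1.1, e.1.2, by simpa using he, Or.inl rfl⟩
  exact hd

theorem pvPassB_sound (E l : List ((Int × Int) × Int)) (src : Int) (hl : ∀ e ∈ l, e ∈ E)
    (d : PySem.Dict Int Int) (hd : ∀ w x, d.get? w = some x → pvR E src w x) :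
    ∀ w x, (l.foldl pvStepB d).get? w = some x → pvR E src w x := by
  induction l generalizing d with
  | nil => exact hd
  | cons e l ih =>
    simp only [List.foldl_cons]
    exact ih (fun x hx => hl x (List.mem_cons_of_mem _ hx)) _
      (pvStepB_sound E src d e (hl e List.mem_cons_self) hd)

-- {src: 0} has exactly the entry (src, 0)
theorem pv_get_init (src w : Int) (x : Int) :
    (PySem.Dict.ofList [(src, 0)]).get? w = some x ↔ w = src ∧ x = 0 := by
  simp only [PySem.Dict.ofList, PySem.Dict.get?, PySem.Dict.empty]
  by_cases hw : w = src <;> simp [hw, PySem.Dict.update, PySem.Dict.insert, PySem.Dict.contains]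
  · constructor
    · intro h; omega
    · intro h; omega
  · intro h; omega

-- fixpoint property of A's final dict
def pvFix (d : PySem.Dict Int Int) (E : List ((Int × Int) × Int)) : Prop :=
  ∀ e ∈ E,
    (∀ ea, d.get? e.1.1 = some ea → ea < e.2 → ∃ eb, d.get? e.1.2 = some eb ∧ eb ≤ e.2) ∧
    (∀ eb, d.get? e.1.2 = some eb → eb < e.2 → ∃ ea, d.get? e.1.1 = some ea ∧ ea ≤ e.2)

theorem pvRelax1_dichot (st : PySem.Dict Int Int × Bool) (a b t : Int) :
    pvRelax1 st a b t = st ∨ (pvRelax1 st a b t).2 = true := by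
  unfold pvRelax1
  cases hga : st.1.get? a with
  | none => left; rfl
  | some ea =>
    by_cases hlt : ea < t
    · cases hgb : st.1.get? b with
      | none => right; simp [hlt]
      | some eb => by_cases hteb : t < eb <;> simp [hlt, hteb]
    · simp [hlt]

theorem pvRelax1_ch (st : PySem.Dict Int Int × Bool) (a b t : Int) (h : st.2 = true) :
    (pvRelax1 st a b t).2 = true := by
  rcases pvRelax1_dichot st a b t with h1 | h1
  · rw [h1]; exact h
  · exact h1

theorem pvRelaxA_dichot (st : PySem.Dict Int Int × Bool) (e : (Int × Int) × Int) :
    pvRelaxA st e = st ∨ (pvRelaxA st e).2 = true := by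
  unfold pvRelaxA
  rcases pvRelax1_dichot st e.1.1 e.1.2 e.2 with h1 | h1
  · rw [h1]; exact pvRelax1_dichot st e.1.2 e.1.1 e.2
  · right; exact pvRelax1_ch _ _ _ _ h1

theorem pvRelaxA_ch (st : PySem.Dict Int Int × Bool) (e : (Int × Int) × Int) (h : st.2 = true) :
    (pvRelaxA st e).2 = true := by
  rcases pvRelaxA_dichot st e with h1 | h1
  · rw [h1]; exact h
  · exact h1

theorem pvPassA_ch (l : List ((Int × Int) × Int)) (st : PySem.Dict Int Int × Bool)
    (h : st.2 = true) : (l.foldl pvRelaxA st).2 = true := by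
  induction l generalizing st with
  | nil => exact h
  | cons e l ih => exact ih _ (pvRelaxA_ch st e h)

theorem pvPassA_noop (l : List ((Int × Int) × Int)) (d : PySem.Dict Int Int)
    (h : (l.foldl pvRelaxA (d, false)).2 = false) :
    l.foldl pvRelaxA (d, false) = (d, false) ∧ ∀ e ∈ l, pvRelaxA (d, false) e = (d, false) := by
  induction l with
  | nil => exact ⟨rfl, by simp⟩
  | cons e l ih =>
    simp only [List.foldl_cons] at h ⊢
    rcases pvRelaxA_dichot (d, false) e with h1 | h1
    · rw [h1] at h ⊢
      obtain ⟨hfix, hall⟩ := ih h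
      refine ⟨hfix, fun f hf => ?_⟩
      rcases List.mem_cons.mp hf with rfl | hf'
      · exact h1
      · exact hall f hf'
    · exfalso
      have := pvPassA_ch l _ h1
      rw [this] at h; cases h

theorem pvRelax1_noop (d : PySem.Dict Int Int) (a b t : Int)
    (h : pvRelax1 (d, false) a b t = (d, false)) :
    ∀ ea, d.get? a = some ea → ea < t → ∃ eb, d.get? b = some eb ∧ eb ≤ t := by
  intro ea hga hlt
  unfold pvRelax1 at h
  simp only at h
  rw [hga] at h
  simp only [hlt, if_true] at h
  cases hgb : d.get? b with
  | none =>
    rw [hgb] at h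
    exact absurd (congrArg Prod.snd h) (by simp)
  | some eb =>
    rw [hgb] at h
    by_cases hteb : t < eb
    · simp only [hteb, if_true] at h
      exact absurd (congrArg Prod.snd h) (by simp)
    · exact ⟨eb, rfl, not_lt.mp hteb⟩

theorem pvRelaxA_noop (d : PySem.Dict Int Int) (e : (Int × Int) × Int)
    (h : pvRelaxA (d, false) e = (d, false)) :
    (∀ ea, d.get? e.1.1 = some ea → ea < e.2 → ∃ eb, d.get? e.1.2 = some eb ∧ eb ≤ e.2) ∧
    (∀ eb, d.get? e.1.2 = some eb → eb < e.2 → ∃ ea, d.get? e.1.1 = some ea ∧ ea ≤ e.2) := by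
  unfold pvRelaxA at h
  have h1 : pvRelax1 (d, false) e.1.1 e.1.2 e.2 = (d, false) := by
    rcases pvRelax1_dichot (d, false) e.1.1 e.1.2 e.2 with h1 | h1
    · exact h1
    · exfalso
      have := pvRelax1_ch _ e.1.2 e.1.1 e.2 h1
      rw [h] at this; cases this
  rw [h1] at h
  exact ⟨pvRelax1_noop d _ _ _ h1, pvRelax1_noop d _ _ _ h⟩

-- the three facts about pvLoopA, by strong induction on the termination measure
theorem pvLoopA_step (edges : List ((Int × Int) × Int)) (d : PySem.Dict Int Int) :
    (pvPassAll edges d = (d, false) ∧ pvLoopA edges d = d) ∨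
    ((pvPassAll edges d).2 = true ∧
      pvLoopA edges d = pvLoopA edges (pvPassAll edges d).1 ∧
      pvMu (edges.flatMap (fun e => [e.1.1, e.1.2])) (edges.map (fun e => e.2))
        (pvPassAll edges d).1 <
      pvMu (edges.flatMap (fun e => [e.1.1, e.1.2])) (edges.map (fun e => e.2)) d) := by
  rcases pvPass_mu (edges.flatMap (fun e => [e.1.1, e.1.2])) (edges.map (fun e => e.2)) edges
      (fun e he => ⟨List.mem_flatMap.mpr ⟨e, he, by simp⟩, List.mem_flatMap.mpr ⟨e, he, by simp⟩,
        List.mem_map.mpr ⟨e, he, rfl⟩⟩) (d, false) with hfix | ⟨hch, hlt⟩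
  · have hfix' : pvPassAll edges d = (d, false) := hfix
    left
    refine ⟨hfix', ?_⟩
    rw [pvLoopA.eq_def, hfix']
    simp
  · have hch' : (pvPassAll edges d).2 = true := hch
    right
    refine ⟨hch', ?_, hlt⟩
    rw [pvLoopA.eq_def, dif_pos hch']

theorem pvLoopA_sound (E edges : List ((Int × Int) × Int)) (src : Int)
    (hl : ∀ e ∈ edges, e ∈ E) (d : PySem.Dict Int Int)
    (hd : ∀ w x, d.get? w = some x → pvR E src w x) :
    ∀ w x, (pvLoopA edges d).get? w = some x → pvR E src w x := by
  generalize hN : pvMu (edges.flatMap (fun e => [e.1.1, e.1.2])) (edges.map (fun e => e.2)) d = N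
  induction N using Nat.strong_induction_on generalizing d with
  | _ N ih =>
    subst hN
    rcases pvLoopA_step edges d with ⟨_, heq⟩ | ⟨_, heq, hlt⟩
    · rw [heq]; exact hd
    · rw [heq]
      have hpassf : (pvPassAll edges d).1 = edges.foldl pvStepB d := pvPass_fst edges (d, false)
      have hpass : ∀ w x, (pvPassAll edges d).1.get? w = some x → pvR E src w x := by
        rw [hpassf]
        exact pvPassB_sound E edges src hl d hd
      exact ih _ hlt _ hpass rfl

theorem pvLoopA_mono (edges : List ((Int × Int) × Int)) (d : PySem.Dict Int Int) (w x : Int)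
    (h : d.get? w = some x) : ∃ y ≤ x, (pvLoopA edges d).get? w = some y := by
  generalize hN : pvMu (edges.flatMap (fun e => [e.1.1, e.1.2])) (edges.map (fun e => e.2)) d = N
  induction N using Nat.strong_induction_on generalizing d x with
  | _ N ih =>
    subst hN
    rcases pvLoopA_step edges d with ⟨_, heq⟩ | ⟨_, heq, hlt⟩
    · rw [heq]; exact ⟨x, le_refl _, h⟩
    · rw [heq]
      have hpassf : (pvPassAll edges d).1 = edges.foldl pvStepB d := pvPass_fst edges (d, false)
      have hg : ∃ y ≤ x, (pvPassAll edges d).1.get? w = some y := by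
        rw [hpassf]
        exact pvPassB_mono edges d w x h
      obtain ⟨y, hy, hg⟩ := hg
      obtain ⟨z, hz, hg2⟩ := ih _ hlt _ y hg rfl
      exact ⟨z, le_trans hz hy, hg2⟩

theorem pvLoopA_fix (edges : List ((Int × Int) × Int)) (d : PySem.Dict Int Int) :
    pvFix (pvLoopA edges d) edges := by
  generalize hN : pvMu (edges.flatMap (fun e => [e.1.1, e.1.2])) (edges.map (fun e => e.2)) d = N
  induction N using Nat.strong_induction_on generalizing d with
  | _ N ih =>
    subst hN
    rcases pvLoopA_step edges d with ⟨hfix, heq⟩ | ⟨_, heq, hlt⟩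
    · rw [heq]
      intro e he
      have hfix' : edges.foldl pvRelaxA (d, false) = (d, false) := hfix
      exact pvRelaxA_noop d e ((pvPassA_noop edges d (by rw [hfix'])).2 e he)
    · rw [heq]
      exact ih _ hlt _ rfl

-- A-side completeness: the fixpoint dict dominates every reachability fact
theorem pvFix_complete (E : List ((Int × Int) × Int)) (src : Int) (d : PySem.Dict Int Int)
    (hfix : pvFix d E) (hsrc : ∃ s ≤ (0 : Int), d.get? src = some s) :
    ∀ v t, pvR E src v t → ∃ y ≤ t, d.get? v = some y := by
  intro v t hr
  induction hr with
  | base => exact hsrc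
  | fwd hprev hmem hlt ih =>
    obtain ⟨y, hy, hg⟩ := ih
    obtain ⟨eb, hgb, hle⟩ := (hfix _ hmem).1 y hg (lt_of_le_of_lt hy hlt)
    exact ⟨eb, hle, hgb⟩
  | bwd hprev hmem hlt ih =>
    obtain ⟨y, hy, hg⟩ := ih
    obtain ⟨ea, hga, hle⟩ := (hfix _ hmem).2 y hg (lt_of_le_of_lt hy hlt)
    exact ⟨ea, hle, hga⟩

-- B-side completeness over the sorted single pass
theorem pvR_append_one (pre : List ((Int × Int) × Int)) (e : (Int × Int) × Int) (src : Int)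
    (hmax : ∀ f ∈ pre, f.2 ≤ e.2) :
    ∀ v t, pvR (pre ++ [e]) src v t →
      pvR pre src v t ∨ (t = e.2 ∧
        ((∃ t', t' < e.2 ∧ pvR pre src e.1.1 t' ∧ v = e.1.2) ∨
         (∃ t', t' < e.2 ∧ pvR pre src e.1.2 t' ∧ v = e.1.1))) := by
  intro v t hr
  induction hr with
  | base => left; exact pvR.base
  | @fwd u v t t' hprev hmem hlt ih =>
    rcases ih with hpre | ⟨ht', _⟩
    · rcases List.mem_append.mp hmem with hm | hm
      · left; exact pvR.fwd hpre hm hlt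
      · have he : e = ((u, v), t) := by have := (List.mem_singleton.mp hm); exact this.symm
        subst he
        right
        exact ⟨rfl, Or.inl ⟨t', hlt, hpre, rfl⟩⟩
    · exfalso
      rcases List.mem_append.mp hmem with hm | hm
      · have := hmax _ hm
        simp only at this
        omega
      · have he : e = ((u, v), t) := by have := (List.mem_singleton.mp hm); exact this.symm
        subst he
        simp only at ht'
        omega
  | @bwd u v t t' hprev hmem hlt ih =>
    rcases ih with hpre | ⟨ht', _⟩
    · rcases List.mem_append.mp hmem with hm | hm
      · left; exact pvR.bwd hpre hm hlt
      · have he : e = ((u, v), t) := by have := (List.mem_singleton.mp hm); exact this.symm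
        subst he
        right
        exact ⟨rfl, Or.inr ⟨t', hlt, hpre, rfl⟩⟩
    · exfalso
      rcases List.mem_append.mp hmem with hm | hm
      · have := hmax _ hm
        simp only at this
        omega
      · have he : e = ((u, v), t) := by have := (List.mem_singleton.mp hm); exact this.symm
        subst he
        simp only at ht'
        omega

theorem pvRelaxB1_relax (d : PySem.Dict Int Int) (a b t : Int) (s : Int)
    (ha : ∃ y ≤ s, d.get? a = some y) (hs : s < t) :
    ∃ z ≤ t, (pvRelaxB1 d a b t).get? b = some z := by
  obtain ⟨y, hy, hga⟩ := ha
  unfold pvRelaxB1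
  split
  · rw [PySem.Dict.get?_insert_self]
    exact ⟨t, le_refl _, rfl⟩
  · next hcond =>
    have h1 : Option.any (fun ea => decide (ea < t)) (d.get? a) = true := by
      rw [hga]; simp; omega
    rw [h1, Bool.true_and] at hcond
    cases hgb : d.get? b with
    | none => rw [hgb] at hcond; simp at hcond
    | some eb =>
      rw [hgb] at hcond
      simp at hcond
      exact ⟨eb, by omega, rfl⟩

def pvInv (E : List ((Int × Int) × Int)) (src : Int) (d : PySem.Dict Int Int) : Prop :=
  ∀ v t, pvR E src v t → ∃ y ≤ t, d.get? v = some y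

theorem pvStepB_inv (pre : List ((Int × Int) × Int)) (e : (Int × Int) × Int) (src : Int)
    (hmax : ∀ f ∈ pre, f.2 ≤ e.2) (d : PySem.Dict Int Int) (hinv : pvInv pre src d) :
    pvInv (pre ++ [e]) src (pvStepB d e) := by
  intro v t hr
  rcases pvR_append_one pre e src hmax v t hr with hpre | ⟨rfl, hcase⟩
  · obtain ⟨y, hy, hg⟩ := hinv v t hpre
    obtain ⟨z, hz, hg2⟩ := pvStepB_mono d e v y hg
    exact ⟨z, le_trans hz hy, hg2⟩
  · rcases hcase with ⟨t', ht', hreach, rfl⟩ | ⟨t', ht', hreach, rfl⟩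
    · -- forward use of e: endpoint e.1.1 reached before e.2, target e.1.2
      obtain ⟨y, hy, hg⟩ := hinv _ _ hreach
      unfold pvStepB
      obtain ⟨z, hz, hg1⟩ := pvRelaxB1_relax d e.1.1 e.1.2 e.2 t' ⟨y, hy, hg⟩ ht'
      obtain ⟨z2, hz2, hg2⟩ := pvRelaxB1_mono _ e.1.2 e.1.1 e.2 _ z hg1
      exact ⟨z2, le_trans hz2 hz, hg2⟩
    · -- backward use of e: endpoint e.1.2 reached before e.2, target e.1.1
      obtain ⟨y, hy, hg⟩ := hinv _ _ hreach
      unfold pvStepB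
      obtain ⟨y1, hy1, hg1⟩ := pvRelaxB1_mono d e.1.1 e.1.2 e.2 _ y hg
      exact pvRelaxB1_relax _ e.1.2 e.1.1 e.2 t' ⟨y1, le_trans hy1 hy, hg1⟩ ht'

theorem pvR_nil (src v t : Int) (h : pvR [] src v t) : v = src ∧ t = 0 := by
  cases h with
  | base => exact ⟨rfl, rfl⟩
  | fwd _ hmem _ => cases hmem
  | bwd _ hmem _ => cases hmem

theorem pvPassB_inv (src : Int) (suf pre : List ((Int × Int) × Int)) (d : PySem.Dict Int Int)
    (hsorted : (pre ++ suf).Pairwise (fun a b => a.2 ≤ b.2)) (hinv : pvInv pre src d) :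
    pvInv (pre ++ suf) src (suf.foldl pvStepB d) := by
  induction suf generalizing pre d with
  | nil => simpa using hinv
  | cons e suf ih =>
    have hmax : ∀ f ∈ pre, f.2 ≤ e.2 := by
      intro f hf
      have := (List.pairwise_append.mp hsorted).2.2 f hf e List.mem_cons_self
      exact this
    have hstep := pvStepB_inv pre e src hmax d hinv
    have hsorted' : ((pre ++ [e]) ++ suf).Pairwise (fun a b => a.2 ≤ b.2) := by
      simpa using hsorted
    have := ih (pre ++ [e]) (pvStepB d e) hsorted' hstep
    simpa using this

-- key sets of A's fixpoint and B's single pass agree on a sorted edge list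
theorem pv_keys_agree (edges : List ((Int × Int) × Int))
    (hsorted : edges.Pairwise (fun a b => a.2 ≤ b.2)) (src : Int) (w : Int) :
    w ∈ (pvLoopA edges (PySem.Dict.ofList [(src, 0)])).keys ↔
    w ∈ (edges.foldl pvStepB (PySem.Dict.ofList [(src, 0)])).keys := by
  have hinit : ∀ w x, (PySem.Dict.ofList [(src, 0)]).get? w = some x → pvR edges src w x := by
    intro w x h
    obtain ⟨rfl, rfl⟩ := (pv_get_init src w x).mp h
    exact pvR.base
  have hinit0 : (PySem.Dict.ofList [(src, (0 : Int))]).get? src = some (0 : Int) := (pv_get_init src src 0).mpr ⟨rfl, rfl⟩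
  have hBinv : pvInv edges src (edges.foldl pvStepB (PySem.Dict.ofList [(src, 0)])) := by
    have := pvPassB_inv src edges [] (PySem.Dict.ofList [(src, 0)]) (by simpa using hsorted)
      (by intro v t hr; obtain ⟨rfl, rfl⟩ := pvR_nil src v t hr; exact ⟨0, le_refl _, hinit0⟩)
    simpa using this
  have hAfix := pvLoopA_fix edges (PySem.Dict.ofList [(src, 0)])
  have hAsrc : ∃ s ≤ (0 : Int), (pvLoopA edges (PySem.Dict.ofList [(src, 0)])).get? src = some s := by
    obtain ⟨y, hy, hg⟩ := pvLoopA_mono edges (PySem.Dict.ofList [(src, 0)]) src 0 hinit0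
    exact ⟨y, hy, hg⟩
  constructor
  · intro h
    obtain ⟨x, hx⟩ := Option.isSome_iff_exists.mp ((pv_mem_keys_iff _ w).mpr h)
    have hr := pvLoopA_sound edges edges src (fun _ h => h) _ hinit w x hx
    obtain ⟨y, _, hg⟩ := hBinv w x hr
    exact (pv_mem_keys_iff _ w).mp (by rw [hg]; rfl)
  · intro h
    obtain ⟨x, hx⟩ := Option.isSome_iff_exists.mp ((pv_mem_keys_iff _ w).mpr h)
    have hr := pvPassB_sound edges edges src (fun _ h => h) _ hinit w x hx
    obtain ⟨y, _, hg⟩ := pvFix_complete edges src _ hAfix hAsrc w x hr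
    exact (pv_mem_keys_iff _ w).mp (by rw [hg]; rfl)

-- membership after collecting (src, v) pairs from a key list
theorem pv_collect_mem (src : Int) (ks : List Int) (acc : PySem.Set (Int × Int)) (p : Int × Int) :
    p ∈ ks.foldl (fun pairs v => if v ≠ src then PySem.Set.add pairs (src, v) else pairs) acc ↔
    p ∈ acc ∨ ∃ v ∈ ks, v ≠ src ∧ p = (src, v) := by
  induction ks generalizing acc with
  | nil => simp
  | cons k ks ih =>
    simp only [List.foldl_cons]
    by_cases hk : k ≠ src
    · rw [if_pos hk, ih]
      rw [PySem.Set.mem_add]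
      constructor
      · rintro (⟨h | h⟩ | h)
        · left; exact h
        · right; exact ⟨k, List.mem_cons_self, hk, h⟩
        · obtain ⟨v, hv, hvs, rfl⟩ := h
          right; exact ⟨v, List.mem_cons_of_mem _ hv, hvs, rfl⟩
      · rintro (h | ⟨v, hv, hvs, rfl⟩)
        · left; left; exact h
        · rcases List.mem_cons.mp hv with rfl | hv'
          · left; right; rfl
          · right; exact ⟨v, hv', hvs, rfl⟩
    · rw [if_neg hk, ih]
      rw [not_not] at hk
      subst hk
      constructor
      · rintro (h | ⟨v, hv, hvs, rfl⟩)
        · left; exact h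
        · right; exact ⟨v, List.mem_cons_of_mem _ hv, hvs, rfl⟩
      · rintro (h | ⟨v, hv, hvs, rfl⟩)
        · left; exact h
        · rcases List.mem_cons.mp hv with rfl | hv'
          · exact absurd rfl hvs
          · right; exact ⟨v, hv', hvs, rfl⟩

-- the two temporal_reachability results contain the same pairs
theorem pvTr_mem (n : Int) (d : PySem.Dict (Int × Int) Int) (es : PySem.Set (Int × Int))
    (p : Int × Int) : p ∈ pvTrA n d es ↔ p ∈ pvTrB n d es := by
  unfold pvTrA pvTrB
  set edges := PySem.List.sorted (es.map (fun e => (e, d.getD e 0))) (fun x => x.2) false with hedges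
  have hsorted : edges.Pairwise (fun a b => a.2 ≤ b.2) := PySem.List.sorted_pairwise _ _
  have hkeys : ∀ src w, w ∈ (pvLoopA edges (PySem.Dict.ofList [(src, 0)])).keys ↔
      w ∈ (edges.foldl pvStepB (PySem.Dict.ofList [(src, 0)])).keys :=
    fun src w => pv_keys_agree edges hsorted src w
  generalize PySem.List.pyRange 0 n 1 = srcs
  have hgen : ∀ (accA accB : PySem.Set (Int × Int)), (∀ q, q ∈ accA ↔ q ∈ accB) →
      ∀ q, q ∈ srcs.foldl (fun pairs src =>
          (pvLoopA edges (PySem.Dict.ofList [(src, 0)])).keys.foldl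
            (fun pairs v => if v ≠ src then PySem.Set.add pairs (src, v) else pairs) pairs) accA ↔
        q ∈ srcs.foldl (fun pairs src =>
          (edges.foldl pvStepB (PySem.Dict.ofList [(src, 0)])).keys.foldl
            (fun pairs v => if v ≠ src then PySem.Set.add pairs (src, v) else pairs) pairs) accB := by
    induction srcs with
    | nil => intro accA accB h q; simpa using h q
    | cons s srcs ih =>
      intro accA accB h q
      simp only [List.foldl_cons]
      apply ih
      intro q2
      rw [pv_collect_mem, pv_collect_mem]
      constructor
      · rintro (hq | ⟨v, hv, hvs, rfl⟩)
        · left; exact (h q2).mp hq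
        · right; exact ⟨v, (hkeys s v).mp hv, hvs, rfl⟩
      · rintro (hq | ⟨v, hv, hvs, rfl⟩)
        · left; exact (h q2).mpr hq
        · right; exact ⟨v, (hkeys s v).mpr hv, hvs, rfl⟩
  exact hgen PySem.Set.empty PySem.Set.empty (fun _ => Iff.rfl) p

theorem pv_equal_iff (s t : PySem.Set (Int × Int)) :
    PySem.Set.equal s t = true ↔ ∀ q, q ∈ s ↔ q ∈ t := by
  simp only [PySem.Set.equal, PySem.Set.issubset, Bool.and_eq_true, List.all_eq_true,
    PySem.Set.contains_iff]
  constructor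
  · intro ⟨h1, h2⟩ q
    exact ⟨fun hq => h1 q hq, fun hq => h2 q hq⟩
  · intro h
    exact ⟨fun q hq => (h q).mp hq, fun q hq => (h q).mpr hq⟩

theorem pv_set_equal_congr (s1 s2 t1 t2 : PySem.Set (Int × Int))
    (hs : ∀ q, q ∈ s1 ↔ q ∈ s2) (ht : ∀ q, q ∈ t1 ↔ q ∈ t2) :
    PySem.Set.equal s1 t1 = PySem.Set.equal s2 t2 := by
  by_cases h : PySem.Set.equal s2 t2 = true
  · rw [h, pv_equal_iff]
    intro q
    rw [hs q, ht q]
    exact (pv_equal_iff s2 t2).mp h q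
  · have h1 : ¬ PySem.Set.equal s1 t1 = true := by
      intro hh
      apply h
      rw [pv_equal_iff]
      intro q
      rw [← hs q, ← ht q]
      exact (pv_equal_iff s1 t1).mp hh q
    rw [Bool.not_eq_true] at h h1
    rw [h, h1]

theorem pvSearch_eq (n : Int) (d : PySem.Dict (Int × Int) Int) (fullA fullB : PySem.Set (Int × Int))
    (hfull : ∀ q, q ∈ fullA ↔ q ∈ fullB) (combos : List (List (Int × Int))) (count : Int) :
    pvSearchA n d fullA combos count = pvSearchB n d fullB combos count := by
  induction combos generalizing count with
  | nil => rfl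
  | cons es rest ih =>
    unfold pvSearchA pvSearchB
    simp only [pv_set_equal_congr _ _ _ _ (pvTr_mem n d (PySem.Set.ofList es)) hfull]
    split
    · rfl
    · split
      · rfl
      · exact ih _

-- ===== VERDICT (by name: the statement is the Claim_ definition above) =====
theorem exhaustive_any_2n3_spec : Claim_equal_exhaustive_any_2n3 := by
  intro n ts _ _
  unfold Spec_exhaustive_any_2n3 exhaustive_any_2n3 exhaustive_any_2n3_alt
  exact pvSearch_eq n (pvDictOf ts) _ _ (pvTr_mem n (pvDictOf ts) _) _ 0
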